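-- pv_equiv track=rewrite | github.com/Jaceyli/COMP9021-17S2 | Assignment/Assignment_1/pivoting_die.py | turn_down
-- ===== SOURCE A (Python) =====
-- L = [6, 5, 4, 3, 2, 1]
--
-- def turn_down(top, front, right, n):
--     n %= 4
--     if n == 0:
--         return top, front, right
--     elif n == 1:
--         return L[front - 1], top, right
--     else:
--         return turn_down(L[front - 1], top, right, n - 1)
-- ===== SOURCE B (Python) =====
-- L = [6, 5, 4, 3, 2, 1]
--
-- def turn_down(top, front, right, n):
--     n %= 4
--     for _ in range(n):
--         top, front, right = L[front - 1], top, right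
--     return top, front, right
-- ===== Notes on version B (the rewrite author's own statement) =====
-- stated objective: simpler
-- what changed: Replaces the three-branch tail recursion on n with a single loop that applies the quarter-turn map n%4 times via tuple unpacking; no base-case branches remain.
import Mathlib
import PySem

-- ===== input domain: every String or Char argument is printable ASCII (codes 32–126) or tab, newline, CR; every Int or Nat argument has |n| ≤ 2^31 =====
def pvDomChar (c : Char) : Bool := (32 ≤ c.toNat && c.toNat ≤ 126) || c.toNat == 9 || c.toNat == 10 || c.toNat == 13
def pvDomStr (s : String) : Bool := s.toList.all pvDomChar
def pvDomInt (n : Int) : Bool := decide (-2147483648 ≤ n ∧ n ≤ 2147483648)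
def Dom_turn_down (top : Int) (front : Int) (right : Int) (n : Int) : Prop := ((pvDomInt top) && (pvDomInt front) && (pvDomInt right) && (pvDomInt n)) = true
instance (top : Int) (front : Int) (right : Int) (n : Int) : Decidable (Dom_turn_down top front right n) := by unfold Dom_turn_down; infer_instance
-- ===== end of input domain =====

-- B replaces A's three-branch tail recursion with a single loop applying the quarter-turn map n%4 times (simpler decomposition).


-- ===== PORT A =====
-- the module-level die list L
def Lconst : List Int := [6, 5, 4, 3, 2, 1]

-- A's recursion, on the Nat value of n % 4 (Python's n %= 4 puts n in 0..3, and the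
-- recursive call's own n %= 4 is then the identity); none = IndexError from L[front-1]
def turn_down_aux (top front right : Int) : Nat → Option (Int × Int × Int)
  | 0 => some (top, front, right)
  | 1 => (PySem.List.pyGet? Lconst (front - 1)).map (fun x => (x, top, right))
  | k + 2 => (PySem.List.pyGet? Lconst (front - 1)).bind
      (fun x => turn_down_aux x top right (k + 1))

-- the default (0,0,0) is only reached where Python raises IndexError (excluded by Pre_)
def turn_down (top : Int) (front : Int) (right : Int) (n : Int) : Int × Int × Int :=
  (turn_down_aux top front right (PySem.Int.mod n 4).toNat).getD (0, 0, 0)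

-- ===== PORT B =====
-- loop body: top, front, right = L[front-1], top, right  (getD 0 only reached where
-- Python raises IndexError, excluded by Pre_)
def turn_down_alt (top : Int) (front : Int) (right : Int) (n : Int) : Int × Int × Int :=
  (List.range (PySem.Int.mod n 4).toNat).foldl
    (fun s _ => ((PySem.List.pyGet? Lconst (s.2.1 - 1)).getD 0, s.1, s.2.2))
    (top, front, right)

-- ===== PRECONDITION & SPEC =====
-- Pre_ excludes exactly the inputs where L[front-1] (or L[top-1] on the second turn)
-- raises IndexError in Python; B raises there as well.
def Pre_turn_down (top : Int) (front : Int) (right : Int) (n : Int) : Prop :=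
  PySem.Int.mod n 4 = 0 ∨
    (-5 ≤ front ∧ front ≤ 6 ∧ (PySem.Int.mod n 4 = 1 ∨ (-5 ≤ top ∧ top ≤ 6)))
instance (top : Int) (front : Int) (right : Int) (n : Int) : Decidable (Pre_turn_down top front right n) := by unfold Pre_turn_down; infer_instance

def pvWitness_turn_down : Int × Int × Int × Int := (1, 2, 3, 5)

def Spec_turn_down (top : Int) (front : Int) (right : Int) (n : Int) (out : Int × Int × Int) : Prop := out = turn_down_alt top front right n
instance (top : Int) (front : Int) (right : Int) (n : Int) (out : Int × Int × Int) : Decidable (Spec_turn_down top front right n out) := by unfold Spec_turn_down; infer_instance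

-- ===== CLAIM (what is proved, stated in full; the proofs are below) =====
def Claim_equal_turn_down : Prop := ∀ (top : Int) (front : Int) (right : Int) (n : Int), Dom_turn_down top front right n → Pre_turn_down top front right n → Spec_turn_down top front right n (turn_down top front right n)

-- ===== LEMMAS AND PROOFS =====

-- L[f-1] for f in the admissible index window, as a closed value
theorem getL_eq (f : Int) (h1 : -5 ≤ f) (h2 : f ≤ 6) :
    PySem.List.pyGet? Lconst (f - 1) = some (if 1 ≤ f then 7 - f else 1 - f) := by
  interval_cases f <;> decide

-- ===== VERDICT (by name: the statement is the Claim_ definition above) =====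
theorem turn_down_spec : Claim_equal_turn_down := by
  intro top front right n _ hpre
  unfold Spec_turn_down turn_down turn_down_alt
  have hm : PySem.Int.mod n 4 = n % 4 := PySem.Int.mod_eq_emod_of_pos (by omega)
  unfold Pre_turn_down at hpre
  rw [hm] at hpre ⊢
  have hb0 : 0 ≤ n % 4 := Int.emod_nonneg n (by omega)
  have hb1 : n % 4 < 4 := Int.emod_lt_of_pos n (by omega)
  have hcase : n % 4 = 0 ∨ n % 4 = 1 ∨ n % 4 = 2 ∨ n % 4 = 3 := by omega
  rcases hcase with h | h | h | h <;> rw [h]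
  · rfl
  · obtain ⟨hf1, hf2, -⟩ : -5 ≤ front ∧ front ≤ 6 ∧ _ := by
      rcases hpre with h0 | h0; · omega
      · exact h0
    simp [List.range_succ, getL_eq front hf1 hf2, turn_down_aux]
  · obtain ⟨hf1, hf2, hrest⟩ : -5 ≤ front ∧ front ≤ 6 ∧ _ := by
      rcases hpre with h0 | h0; · omega
      · exact h0
    obtain ⟨ht1, ht2⟩ : -5 ≤ top ∧ top ≤ 6 := by rcases hrest with h1 | h1; · omega
                                                 · exact h1
    simp [List.range_succ, getL_eq front hf1 hf2, getL_eq top ht1 ht2, turn_down_aux]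
  · obtain ⟨hf1, hf2, hrest⟩ : -5 ≤ front ∧ front ≤ 6 ∧ _ := by
      rcases hpre with h0 | h0; · omega
      · exact h0
    obtain ⟨ht1, ht2⟩ : -5 ≤ top ∧ top ≤ 6 := by rcases hrest with h1 | h1; · omega
                                                 · exact h1
    have hv1 : -5 ≤ (if 1 ≤ front then 7 - front else 1 - front) ∧
        (if 1 ≤ front then 7 - front else 1 - front) ≤ 6 := by split <;> omega
    simp [List.range_succ, getL_eq front hf1 hf2, getL_eq top ht1 ht2,
      getL_eq _ hv1.1 hv1.2, turn_down_aux]
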